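-- pv_equiv track=rewrite | github.com/aleksanderZak7/SPOJ | Python/Plusy i minusy II.py | calculate_grades
-- ===== SOURCE A (Python) =====
-- def calculate_grades(activity):
--     stack = []
--     grades = []
--     for char in activity:
--         if stack and stack[-1] != char:
--             stack.pop()
--         else:
--             stack.append(char)
--             if len(stack) == 3:
--                 grades.append('5' if char == '+' else '1')
--                 stack.clear()
--     return ' '.join(grades) if grades else 'BRAK'
-- ===== SOURCE B (Python) =====
-- def calculate_grades(activity):
--     # Stage 1: run-length encode the string.
--     runs = []
--     for ch in activity:
--         if runs and runs[-1][0] == ch: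
--             runs[-1] = (ch, runs[-1][1] + 1)
--         else:
--             runs.append((ch, 1))
--     # Stage 2: process whole runs arithmetically with divmod instead of per-char steps.
--     grades = []
--     pend_char, pend = '', 0
--     for ch, length in runs:
--         if pend > 0 and pend_char != ch:
--             cancel = min(pend, length)
--             pend -= cancel
--             length -= cancel
--             if length == 0:
--                 continue
--         q, pend = divmod(pend + length, 3)
--         grades.extend(['5' if ch == '+' else '1'] * q)
--         pend_char = ch
--     return ' '.join(grades) if grades else 'BRAK'
-- ===== Notes on version B (the rewrite author's own statement) =====
-- stated objective: alternative
-- what changed: Two staged passes: first run-length encodes the string, then processes each run as a whole with min/divmod arithmetic (emitting q grades at once), instead of A's per-character stack push/pop simulation.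
import Mathlib
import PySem

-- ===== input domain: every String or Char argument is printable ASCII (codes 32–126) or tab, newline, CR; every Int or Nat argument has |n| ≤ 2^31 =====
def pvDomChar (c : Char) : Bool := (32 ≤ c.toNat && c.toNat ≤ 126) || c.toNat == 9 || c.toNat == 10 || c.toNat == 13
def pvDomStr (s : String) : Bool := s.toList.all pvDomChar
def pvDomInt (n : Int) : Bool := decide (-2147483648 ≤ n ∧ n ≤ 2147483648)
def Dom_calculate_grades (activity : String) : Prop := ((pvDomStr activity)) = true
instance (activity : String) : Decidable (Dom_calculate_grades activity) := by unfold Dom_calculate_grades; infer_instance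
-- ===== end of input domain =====

-- B replaces A's per-character stack simulation by two staged passes: a run-length
-- encoding of the string, then whole-run arithmetic with min/divmod; same O(n) cost.


-- ===== PORT A =====
-- one iteration of A's loop over (stack, grades)
def cgStepA (st : List Char × List String) (c : Char) : List Char × List String :=
  if st.1 ≠ [] ∧ st.1.getLast? ≠ some c then
    (st.1.dropLast, st.2)
  else
    let stack' := st.1 ++ [c]
    if stack'.length = 3 then ([], st.2 ++ [if c = '+' then "5" else "1"])
    else (stack', st.2)

def calculate_grades (activity : String) : String :=
  let st := activity.toList.foldl cgStepA ([], [])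
  if st.2 ≠ [] then PySem.Str.join " " st.2 else "BRAK"

-- ===== PORT B =====
-- stage 1: run-length encoding, transliterating B's loop (append or bump the last run)
def cgRle (runs : List (Char × Nat)) (ch : Char) : List (Char × Nat) :=
  match runs.getLast? with
  | some (c, n) => if c = ch then runs.dropLast ++ [(ch, n + 1)] else runs ++ [(ch, 1)]
  | none => runs ++ [(ch, 1)]

-- stage 2: one run processed as a whole over (pend_char, pend, grades); B initialises
-- pend_char to '', never compared while pend = 0 — the port uses ' '.
def cgRunStep (st : Char × Nat × List String) (r : Char × Nat) : Char × Nat × List String :=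
  let pc := st.1; let p := st.2.1; let g := st.2.2
  let c := r.1; let L := r.2
  if p > 0 ∧ pc ≠ c then
    let m := min p L
    let p' := p - m
    let L' := L - m
    if L' = 0 then (pc, p', g)
    else (c, (p' + L') % 3, g ++ List.replicate ((p' + L') / 3) (if c = '+' then "5" else "1"))
  else
    (c, (p + L) % 3, g ++ List.replicate ((p + L) / 3) (if c = '+' then "5" else "1"))

def calculate_grades_alt (activity : String) : String :=
  let runs := activity.toList.foldl cgRle []
  let st := runs.foldl cgRunStep (' ', 0, [])
  if st.2.2 ≠ [] then PySem.Str.join " " st.2.2 else "BRAK"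

-- ===== PRECONDITION & SPEC =====
def Spec_calculate_grades (activity : String) (out : String) : Prop := out = calculate_grades_alt activity
instance (activity : String) (out : String) : Decidable (Spec_calculate_grades activity out) := by unfold Spec_calculate_grades; infer_instance

-- ===== CLAIM (what is proved, stated in full; the proofs are below) =====
def Claim_equal_calculate_grades : Prop := ∀ (activity : String), Dom_calculate_grades activity → Spec_calculate_grades activity (calculate_grades activity)

-- ===== LEMMAS AND PROOFS =====

-- intermediate per-character counter machine used only by the proof:
-- state (pend_char, pend, grades), one character at a time
def cgStepB (st : Char × Nat × List String) (c : Char) : Char × Nat × List String :=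
  if st.2.1 > 0 ∧ st.1 ≠ c then
    (st.1, st.2.1 - 1, st.2.2)
  else
    if st.2.1 + 1 = 3 then (c, 0, st.2.2 ++ [if c = '+' then "5" else "1"])
    else (c, st.2.1 + 1, st.2.2)

-- flatten of a run list
def cgFlat (runs : List (Char × Nat)) : List Char :=
  runs.flatMap (fun r => List.replicate r.2 r.1)

-- A's stack is a run of the counter's pend_char of length pend (≤ 2)
theorem cgStep_sim (c rc : Char) (n : Nat) (g : List String) (h : n ≤ 2) :
    cgStepA (List.replicate n rc, g) c
      = (List.replicate (cgStepB (rc, n, g) c).2.1 (cgStepB (rc, n, g) c).1,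
         (cgStepB (rc, n, g) c).2.2)
      ∧ (cgStepB (rc, n, g) c).2.1 ≤ 2 := by
  by_cases hc : rc = c
  · subst hc
    interval_cases n <;> simp [cgStepA, cgStepB, List.replicate]
  · interval_cases n <;>
      simp [cgStepA, cgStepB, List.replicate, hc]

theorem cgFold_sim (cs : List Char) : ∀ (rc : Char) (n : Nat) (g : List String), n ≤ 2 →
    (cs.foldl cgStepA (List.replicate n rc, g)).2 = (cs.foldl cgStepB (rc, n, g)).2.2 := by
  induction cs with
  | nil => intro rc n g _; simp
  | cons c cs ih =>
    intro rc n g h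
    obtain ⟨heq, hle⟩ := cgStep_sim c rc n g h
    simp only [List.foldl_cons, heq]
    exact ih _ _ _ hle

-- counting phase: a run of c starting with no pending conflict is pure mod-3 arithmetic
theorem cgAccum (c : Char) (L : Nat) : ∀ (pc : Char) (p : Nat) (g : List String), p ≤ 2 →
    (p = 0 ∨ pc = c) →
    (List.replicate L c).foldl cgStepB (pc, p, g)
      = (if L = 0 then pc else c, (p + L) % 3,
         g ++ List.replicate ((p + L) / 3) (if c = '+' then "5" else "1")) := by
  induction L with
  | zero =>
    intro pc p g hp _
    simp [Nat.mod_eq_of_lt (by omega : p < 3), Nat.div_eq_of_lt (by omega : p < 3)]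
  | succ L ih =>
    intro pc p g hp hpc
    have hstep : cgStepB (pc, p, g) c
        = (if p + 1 = 3 then (c, 0, g ++ [if c = '+' then "5" else "1"]) else (c, p + 1, g)) := by
      rcases hpc with h0 | hpc
      · subst h0; simp [cgStepB]
      · subst hpc; simp [cgStepB]
    rw [List.replicate_succ, List.foldl_cons, hstep]
    by_cases h3 : p + 1 = 3
    · rw [if_pos h3, ih c 0 _ (by omega) (Or.inl rfl)]
      have h1 : (p + (L + 1)) % 3 = (0 + L) % 3 := by omega
      have h2 : (p + (L + 1)) / 3 = (0 + L) / 3 + 1 := by omega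
      rw [h1, h2]
      have : L / 3 + 1 = 1 + L / 3 := by omega
      simp [List.replicate_succ, List.append_assoc, this,
        List.replicate_add]
    · rw [if_neg h3, ih c (p + 1) _ (by omega) (Or.inr rfl)]
      have h1 : p + 1 + L = p + (L + 1) := by omega
      simp [h1]

-- cancelling phase: a conflicting run first eats the pending characters
theorem cgCancel (c pc : Char) (hne : pc ≠ c) : ∀ (L p : Nat) (g : List String),
    (List.replicate L c).foldl cgStepB (pc, p, g)
      = (List.replicate (L - min p L) c).foldl cgStepB (pc, p - min p L, g) := by
  intro L
  induction L with
  | zero => intro p g; simp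
  | succ L ih =>
    intro p g
    rcases Nat.eq_zero_or_pos p with h0 | hpos
    · subst h0; simp
    · have hstep : cgStepB (pc, p, g) c = (pc, p - 1, g) := by
        simp [cgStepB, hne, hpos]
      rw [List.replicate_succ, List.foldl_cons, hstep, ih (p - 1) g]
      have e1 : L - min (p - 1) L = L + 1 - min p (L + 1) := by omega
      have e2 : p - 1 - min (p - 1) L = p - min p (L + 1) := by omega
      rw [e1, e2]

-- one whole run of the counter machine equals one cgRunStep
theorem cgRun_sim (c pc : Char) (L p : Nat) (g : List String) (hp : p ≤ 2) (hL : 1 ≤ L) :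
    (List.replicate L c).foldl cgStepB (pc, p, g) = cgRunStep (pc, p, g) (c, L) := by
  by_cases hc : p > 0 ∧ pc ≠ c
  · rw [cgCancel c pc hc.2 L p g]
    by_cases hz : L - min p L = 0
    · rw [hz]
      simp only [List.replicate, List.foldl_nil, cgRunStep]
      rw [if_pos hc, if_pos hz]
    · have hm : min p L = p := by omega
      have hz' : ¬ (L - p = 0) := by omega
      rw [cgAccum c (L - min p L) pc (p - min p L) g (by omega) (Or.inl (by omega))]
      simp only [cgRunStep, hm]
      rw [if_pos hc]
      simp [hz']
  · have hor : p = 0 ∨ pc = c := by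
      rcases Nat.eq_zero_or_pos p with h | h
      · exact Or.inl h
      · exact Or.inr (by by_contra hne; exact hc ⟨h, hne⟩)
    rw [cgAccum c L pc p g hp hor]
    simp only [cgRunStep]
    rw [if_neg hc, if_neg (show ¬ L = 0 by omega)]

theorem cgRunStep_le (st : Char × Nat × List String) (r : Char × Nat) (h : st.2.1 ≤ 2) :
    (cgRunStep st r).2.1 ≤ 2 := by
  unfold cgRunStep
  dsimp only
  split_ifs <;> simp <;> omega

-- the counter machine over the flattening of runs equals the run machine
theorem cgRunsFold (runs : List (Char × Nat)) : ∀ (st : Char × Nat × List String),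
    (∀ r ∈ runs, 1 ≤ r.2) → st.2.1 ≤ 2 →
    (cgFlat runs).foldl cgStepB st = runs.foldl cgRunStep st := by
  induction runs with
  | nil => intro st _ _; simp [cgFlat]
  | cons r rs ih =>
    intro st hlen hle
    obtain ⟨c, L⟩ := r
    obtain ⟨pc, p, g⟩ := st
    have h1 : 1 ≤ L := hlen (c, L) (by simp)
    simp only [cgFlat, List.flatMap_cons, List.foldl_append]
    rw [cgRun_sim c pc L p g hle h1]
    exact ih _ (fun r hr => hlen r (by simp [hr])) (cgRunStep_le _ _ hle)

-- the RLE pass: flattening gives back the characters, and every run is nonempty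
theorem cgRle_step (runs : List (Char × Nat)) (ch : Char) (h : ∀ r ∈ runs, 1 ≤ r.2) :
    cgFlat (cgRle runs ch) = cgFlat runs ++ [ch] ∧ ∀ r ∈ cgRle runs ch, 1 ≤ r.2 := by
  unfold cgRle
  cases hrn : runs.getLast? with
  | none =>
    have : runs = [] := List.getLast?_eq_none_iff.mp hrn
    subst this
    simp [cgFlat]
  | some last =>
    obtain ⟨c, n⟩ := last
    obtain ⟨l', rfl⟩ := List.getLast?_eq_some_iff.mp hrn
    by_cases hc : c = ch
    · subst hc
      simp only [List.dropLast_concat]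
      constructor
      · simp [cgFlat, List.replicate_succ']
      · intro r hr
        rcases List.mem_append.mp hr with h1 | h1
        · exact h r (by simp [h1])
        · simp only [List.mem_singleton] at h1
          simp [h1]
    · simp only [if_neg hc]
      constructor
      · simp [cgFlat]
      · intro r hr
        rcases List.mem_append.mp hr with h1 | h1
        · exact h r h1
        · simp only [List.mem_singleton] at h1
          simp [h1]

theorem cgRle_inv (cs : List Char) : ∀ (runs : List (Char × Nat)), (∀ r ∈ runs, 1 ≤ r.2) →
    cgFlat (cs.foldl cgRle runs) = cgFlat runs ++ cs ∧ ∀ r ∈ cs.foldl cgRle runs, 1 ≤ r.2 := by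
  induction cs with
  | nil =>
    intro runs h
    constructor
    · simp
    · simpa using h
  | cons c cs ih =>
    intro runs h
    obtain ⟨hf, hl⟩ := cgRle_step runs c h
    obtain ⟨hf2, hl2⟩ := ih (cgRle runs c) hl
    refine ⟨?_, hl2⟩
    rw [List.foldl_cons, hf2, hf, List.append_assoc]
    rfl

-- ===== VERDICT (by name: the statement is the Claim_ definition above) =====
theorem calculate_grades_spec : Claim_equal_calculate_grades := by
  intro activity _
  show _ = _
  unfold calculate_grades calculate_grades_alt
  have hA := cgFold_sim activity.toList ' ' 0 [] (by omega)
  simp only [List.replicate] at hA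
  obtain ⟨hflat, hlen⟩ := cgRle_inv activity.toList [] (by simp)
  have hB := cgRunsFold (activity.toList.foldl cgRle []) (' ', 0, []) hlen (by simp)
  rw [hflat] at hB
  simp only [cgFlat, List.flatMap_nil, List.nil_append] at hB
  simp only [hA, hB]
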